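-- pv_equiv track=rewrite | github.com/gksoriginals/Project-Rocky | rocky/tui/app.py | _group_dialogue_turns
-- ===== SOURCE A (Python) =====
-- def _group_dialogue_turns(entries: list[dict[str, str]]) -> list[list[dict[str, str]]]:
--     turns: list[list[dict[str, str]]] = []
--     current_turn: list[dict[str, str]] = []
--
--     for entry in entries:
--         role = (entry.get("role") or "").lower()
--         if role not in {"user", "assistant"}:
--             continue
--         if role == "user" and current_turn:
--             turns.append(current_turn)
--             current_turn = []
--         current_turn.append(entry)
--
--     if current_turn:
--         turns.append(current_turn)
--     return turns
-- ===== SOURCE B (Python) =====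
-- def _group_dialogue_turns(entries: list[dict[str, str]]) -> list[list[dict[str, str]]]:
--     filtered = [e for e in entries
--                 if (e.get("role") or "").lower() in ("user", "assistant")]
--     return _split_turns(filtered)
--
--
-- def _split_turns(fs: list[dict[str, str]]) -> list[list[dict[str, str]]]:
--     if not fs:
--         return []
--     i = 1
--     while i < len(fs) and (fs[i].get("role") or "").lower() != "user":
--         i += 1
--     return [fs[:i]] + _split_turns(fs[i:])
-- ===== Notes on version B (the rewrite author's own statement) =====
-- stated objective: alternative
-- what changed: A's single pass with an interleaved turns/current-turn accumulator is replaced by a filter of the relevant entries followed by a recursive split of the filtered list at 'user' boundaries.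
import Mathlib
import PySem

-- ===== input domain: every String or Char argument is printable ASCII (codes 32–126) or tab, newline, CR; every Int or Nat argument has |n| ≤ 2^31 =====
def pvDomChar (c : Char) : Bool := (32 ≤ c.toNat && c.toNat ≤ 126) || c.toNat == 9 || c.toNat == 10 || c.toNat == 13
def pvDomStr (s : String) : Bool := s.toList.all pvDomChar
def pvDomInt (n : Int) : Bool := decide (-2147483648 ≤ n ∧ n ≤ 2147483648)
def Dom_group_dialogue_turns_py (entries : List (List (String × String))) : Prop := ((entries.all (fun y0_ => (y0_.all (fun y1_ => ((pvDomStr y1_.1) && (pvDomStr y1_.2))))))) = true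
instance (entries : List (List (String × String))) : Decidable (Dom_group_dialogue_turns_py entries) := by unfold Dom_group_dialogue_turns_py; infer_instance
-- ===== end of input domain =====

-- B replaces A's interleaved turns/current-turn accumulator by a filter pass followed by
-- recursive splitting of the filtered list at 'user' boundaries (objective: alternative decomposition, same cost).

-- shared helper: role = (entry.get("role") or "").lower()  (dict = assoc list, first match;
-- 'or ""' only maps None/"" to "", which .lower() leaves as "" anyway — exact)
def pvRole (e : List (String × String)) : String :=
  PySem.Str.lower (match e.find? (fun p => p.1 == "role") with | some p => p.2 | none => "")

def pvKeep (e : List (String × String)) : Bool :=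
  pvRole e == "user" || pvRole e == "assistant"

def pvIsUser (e : List (String × String)) : Bool := pvRole e == "user"

-- ===== PORT A =====
-- one loop step of A's for-loop over (turns, current_turn)
def stepA (s : List (List (List (String × String))) × List (List (String × String)))
    (e : List (String × String)) :
    List (List (List (String × String))) × List (List (String × String)) :=
  if pvKeep e = false then s
  else if pvIsUser e = true ∧ s.2 ≠ [] then (s.1 ++ [s.2], [e])
  else (s.1, s.2 ++ [e])

def group_dialogue_turns_py (entries : List (List (String × String))) : List (List (List (String × String))) :=
  let s := entries.foldl stepA ([], [])
  if s.2 ≠ [] then s.1 ++ [s.2] else s.1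

-- ===== PORT B =====
-- _split_turns: the while-loop scan for the next 'user' boundary is List.span
def splitTurns : List (List (String × String)) → List (List (List (String × String)))
  | [] => []
  | x :: xs =>
    let p := xs.span (fun e => !(pvIsUser e))
    (x :: p.1) :: splitTurns p.2
termination_by fs => fs.length
decreasing_by
  simp only [List.span_eq_takeWhile_dropWhile]
  exact Nat.lt_succ_of_le (xs.length_dropWhile_le _)

def group_dialogue_turns_py_alt (entries : List (List (String × String))) : List (List (List (String × String))) :=
  splitTurns (entries.filter pvKeep)

-- ===== PRECONDITION & SPEC =====
def Spec_group_dialogue_turns_py (entries : List (List (String × String))) (out : List (List (List (String × String)))) : Prop := out = group_dialogue_turns_py_alt entries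
instance (entries : List (List (String × String))) (out : List (List (List (String × String)))) : Decidable (Spec_group_dialogue_turns_py entries out) := by unfold Spec_group_dialogue_turns_py; infer_instance

-- ===== CLAIM (what is proved, stated in full; the proofs are below) =====
def Claim_equal_group_dialogue_turns_py : Prop := ∀ (entries : List (List (String × String))), Dom_group_dialogue_turns_py entries → Spec_group_dialogue_turns_py entries (group_dialogue_turns_py entries)

-- ===== LEMMAS AND PROOFS =====

-- A's finalisation step
def finA (s : List (List (List (String × String))) × List (List (String × String))) :
    List (List (List (String × String))) :=
  if s.2 ≠ [] then s.1 ++ [s.2] else s.1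

-- entries A skips are identity steps: the fold over entries equals the fold over the filtered list
theorem foldl_stepA_filter (l : List (List (String × String)))
    (s : List (List (List (String × String))) × List (List (String × String))) :
    l.foldl stepA s = (l.filter pvKeep).foldl stepA s := by
  induction l generalizing s with
  | nil => rfl
  | cons e l ih =>
    by_cases h : pvKeep e = true
    · simp [h, ih]
    · simp only [Bool.not_eq_true] at h
      simp [h, stepA, ih]

-- completed turns already in the accumulator are a prefix of the final result
theorem finA_prefix (fs : List (List (String × String)))
    (turns : List (List (List (String × String)))) (cur : List (List (String × String))) :
    finA (fs.foldl stepA (turns, cur)) = turns ++ finA (fs.foldl stepA ([], cur)) := by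
  induction fs generalizing turns cur with
  | nil =>
    simp only [List.foldl_nil, finA]
    by_cases h : cur = [] <;> simp [h]
  | cons e fs ih =>
    by_cases hk : pvKeep e = true
    · by_cases hu : pvIsUser e = true ∧ cur ≠ []
      · have hs : ∀ t, stepA (t, cur) e = (t ++ [cur], [e]) := by
          intro t; simp [stepA, hk, hu.1, hu.2]
        simp only [List.foldl_cons, hs]
        rw [ih (turns ++ [cur]) [e], ih ([] ++ [cur]) [e]]
        simp
      · have hs : ∀ t, stepA (t, cur) e = (t, cur ++ [e]) := by
          intro t; simp [stepA, hk, hu]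
        simp only [List.foldl_cons, hs]
        exact ih ..
    · simp only [Bool.not_eq_true] at hk
      simp only [List.foldl_cons, stepA, hk, if_true]
      exact ih ..

-- main invariant: on a list of kept entries, A's loop starting from a nonempty current turn
-- produces the current turn extended to the next 'user' boundary, then B's recursive splitting
theorem finA_splitTurns (fs : List (List (String × String)))
    (hall : ∀ e ∈ fs, pvKeep e = true)
    (cur : List (List (String × String))) (hcur : cur ≠ []) :
    finA (fs.foldl stepA ([], cur)) =
      (cur ++ fs.takeWhile (fun e => !(pvIsUser e))) ::
        splitTurns (fs.dropWhile (fun e => !(pvIsUser e))) := by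
  induction fs generalizing cur with
  | nil => simp [finA, hcur, splitTurns]
  | cons e fs ih =>
    have hk : pvKeep e = true := hall e (List.mem_cons_self ..)
    have hall' : ∀ x ∈ fs, pvKeep x = true := fun x hx => hall x (List.mem_cons_of_mem _ hx)
    by_cases hu : pvIsUser e = true
    · have hs : stepA ([], cur) e = ([cur], [e]) := by simp [stepA, hk, hu, hcur]
      simp only [List.foldl_cons, hs]
      rw [finA_prefix, ih hall' [e] (by simp)]
      simp [hu, splitTurns, List.span_eq_takeWhile_dropWhile]
    · simp only [Bool.not_eq_true] at hu
      have hs : stepA ([], cur) e = ([], cur ++ [e]) := by simp [stepA, hk, hu]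
      simp only [List.foldl_cons, hs]
      rw [ih hall' (cur ++ [e]) (by simp)]
      simp [hu]

-- ===== VERDICT (by name: the statement is the Claim_ definition above) =====
theorem group_dialogue_turns_py_spec : Claim_equal_group_dialogue_turns_py := by
  intro entries _
  show finA (entries.foldl stepA ([], [])) = splitTurns (entries.filter pvKeep)
  rw [foldl_stepA_filter]
  have hall : ∀ e ∈ entries.filter pvKeep, pvKeep e = true := by
    intro e he; exact (List.mem_filter.mp he).2
  cases hfs : entries.filter pvKeep with
  | nil => simp [finA, splitTurns]
  | cons x rest =>
    rw [hfs] at hall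
    have hkx : pvKeep x = true := hall x (List.mem_cons_self ..)
    have hrest : ∀ e ∈ rest, pvKeep e = true := fun e he => hall e (List.mem_cons_of_mem _ he)
    have hs : stepA ([], []) x = ([], [x]) := by simp [stepA, hkx]
    simp only [List.foldl_cons, hs]
    rw [finA_splitTurns rest hrest [x] (by simp)]
    simp [splitTurns, List.span_eq_takeWhile_dropWhile]
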